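-- pv_equiv track=rewrite | github.com/abhi-node/finance-office | langgraph-agents/routing/focused_router.py | _build_execution_order_subset
-- ===== SOURCE A (Python) =====
-- from typing import Dict, List, Any, Optional, Set, Tuple
--
-- def _build_execution_order_subset(agents: List[str], dependencies: Dict[str, List[str]]) -> List[str]:
--     """Build execution order for subset of agents."""
--
--     executed = set()
--     order = []
--
--     while len(executed) < len(agents):
--         ready_agents = []
--         for agent_id in agents:
--             if agent_id not in executed:
--                 deps = dependencies.get(agent_id, [])
--                 # Only consider dependencies within this subset
--                 relevant_deps = [d for d in deps if d in agents]
--                 if all(dep in executed for dep in relevant_deps):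
--                     ready_agents.append(agent_id)
--
--         if not ready_agents:
--             remaining = [a for a in agents if a not in executed]
--             order.extend(remaining)
--             break
--
--         order.extend(ready_agents)
--         executed.update(ready_agents)
--
--     return order
-- ===== SOURCE B (Python) =====
-- from typing import Dict, List
--
-- def _build_execution_order_subset(agents: List[str], dependencies: Dict[str, List[str]]) -> List[str]:
--     """Longest-dependency-chain levels via Bellman-Ford-style relaxation (stopping at the
--     fixpoint, at most n rounds; cycle-blocked agents end at level n), then one stable
--     sort of the agents by level."""
--     n = len(agents)
--     in_subset = set(agents)
--     rel = {a: [d for d in dependencies.get(a, []) if d in in_subset] for a in agents}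
--     lev = {a: 0 for a in agents}
--     for _ in range(n):
--         new = {a: (max(lev[d] for d in rel[a]) + 1 if rel[a] else 0) for a in agents}
--         if new == lev:
--             break
--         lev = new
--     return sorted(agents, key=lambda a: lev[a])
-- ===== Notes on version B (the rewrite author's own statement) =====
-- stated objective: faster
-- what changed: A repeatedly peels off rounds of ready agents, rescanning the whole agent list each round with an O(V) list-membership test per dependency; B instead computes each agent's longest-dependency-chain level by Bellman-Ford-style relaxation of a level dict to a fixpoint (at most n rounds; cycle-blocked agents end at level n) and emits the agents in one stable sort by level.
import Mathlib
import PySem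

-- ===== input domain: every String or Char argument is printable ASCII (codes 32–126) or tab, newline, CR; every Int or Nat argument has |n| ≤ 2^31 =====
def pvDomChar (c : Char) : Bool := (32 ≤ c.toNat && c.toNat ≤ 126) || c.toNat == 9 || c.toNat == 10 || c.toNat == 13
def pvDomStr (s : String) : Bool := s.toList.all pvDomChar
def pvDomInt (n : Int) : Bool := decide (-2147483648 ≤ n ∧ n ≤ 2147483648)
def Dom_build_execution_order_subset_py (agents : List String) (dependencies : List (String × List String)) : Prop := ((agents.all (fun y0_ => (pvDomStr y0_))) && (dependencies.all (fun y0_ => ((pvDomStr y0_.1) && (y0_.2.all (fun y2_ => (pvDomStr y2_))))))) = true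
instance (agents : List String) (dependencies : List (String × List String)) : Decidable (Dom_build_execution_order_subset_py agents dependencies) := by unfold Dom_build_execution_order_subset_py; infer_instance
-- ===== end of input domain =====

-- B replaces A's round-by-round peeling of ready agents by a different algorithm: it computes each
-- agent's longest-dependency-chain level by Bellman-Ford-style relaxation to a fixpoint (at most n rounds;
-- agents on or behind a cycle end at level n) and then emits the agents in ONE stable sort by level; objective: faster.

-- ===== PORT A =====
-- inner 'for agent_id in agents: …' loop of one round of A's while-loop
def pyReadyAgents (agents : List String) (dependencies : List (String × List String)) (executed : PySem.Set String) : List String :=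
  agents.foldl (fun ready agent_id =>
    if !(PySem.Set.contains executed agent_id) then
      if (((PySem.Dict.mk dependencies).getD agent_id []).filter (fun d => agents.contains d)).all
          (fun dep => PySem.Set.contains executed dep) then ready ++ [agent_id] else ready
    else ready) []

-- the lemmas below are cited by pyOrderLoop's decreasing_by, so they stay above the port
theorem foldl_nested_if {α : Type} (c1 c2 : α → Bool) (l : List α) (init : List α) :
    l.foldl (fun r a => if c1 a then (if c2 a then r ++ [a] else r) else r) init
      = init ++ l.filter (fun a => c1 a && c2 a) := by
  induction l generalizing init with
  | nil => simp
  | cons x t ih =>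
    simp only [List.foldl_cons, List.filter_cons]
    cases h1 : c1 x <;> cases h2 : c2 x <;> simp [h1, h2, ih]

theorem pyReadyAgents_eq_filter (agents : List String) (dependencies : List (String × List String)) (executed : PySem.Set String) :
    pyReadyAgents agents dependencies executed =
      agents.filter (fun a => !(PySem.Set.contains executed a) &&
        (((PySem.Dict.mk dependencies).getD a []).filter (fun d => agents.contains d)).all
          (fun dep => PySem.Set.contains executed dep)) := by
  unfold pyReadyAgents
  exact foldl_nested_if _ _ agents []

theorem length_le_update (s : PySem.Set String) (l : List String) : s.length ≤ (PySem.Set.update s l).length := by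
  induction l generalizing s with
  | nil => simp [PySem.Set.update_nil]
  | cons y t ih =>
    rw [PySem.Set.update_cons]
    refine le_trans ?_ (ih _)
    rw [PySem.Set.add_eq_ite]; split <;> simp

theorem length_lt_update (s : PySem.Set String) (l : List String) (x : String) (hx : x ∈ l) (hs : x ∉ s) :
    s.length < (PySem.Set.update s l).length := by
  induction l generalizing s with
  | nil => cases hx
  | cons y t ih =>
    rw [PySem.Set.update_cons]
    rcases List.mem_cons.mp hx with rfl | hxt
    · calc s.length < (PySem.Set.add s x).length := by rw [PySem.Set.add_of_not_mem hs]; simp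
        _ ≤ _ := length_le_update _ _
    · by_cases hxy : x ∈ PySem.Set.add s y
      · have hxy' : x = y := by
          rcases (PySem.Set.mem_add _ _ _).mp hxy with h | h
          · exact absurd h hs
          · exact h
        subst hxy'
        calc s.length < (PySem.Set.add s x).length := by rw [PySem.Set.add_of_not_mem hs]; simp
          _ ≤ _ := length_le_update _ _
      · calc s.length ≤ (PySem.Set.add s y).length := by rw [PySem.Set.add_eq_ite]; split <;> simp
          _ < _ := ih _ hxt hxy

def pyOrderLoop (agents : List String) (dependencies : List (String × List String)) (executed : PySem.Set String) (order : List String) : List String :=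
  if h1 : PySem.Set.len executed < agents.length then
    let ready := pyReadyAgents agents dependencies executed
    if h2 : ready = [] then
      order ++ agents.filter (fun a => !(PySem.Set.contains executed a))
    else
      pyOrderLoop agents dependencies (PySem.Set.update executed ready) (order ++ ready)
  else order
termination_by agents.length - executed.length
decreasing_by
  obtain ⟨x, hx⟩ := List.exists_mem_of_ne_nil _ h2
  have hx' : x ∈ pyReadyAgents agents dependencies executed := hx
  have hxe : x ∉ executed := by
    rw [pyReadyAgents_eq_filter] at hx'
    have h := (List.mem_filter.mp hx').2
    simp at h
    exact h.1
  have hlt := length_lt_update executed (pyReadyAgents agents dependencies executed) x hx hxe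
  have h1' : executed.length < agents.length := by
    rw [PySem.Set.len_eq] at h1; exact_mod_cast h1
  omega

def build_execution_order_subset_py (agents : List String) (dependencies : List (String × List String)) : List String :=
  pyOrderLoop agents dependencies PySem.Set.empty []

-- ===== PORT B =====
-- one relaxation round: lev' = {a: (max(lev[d] for d in rel[a]) + 1 if rel[a] else 0) for a in agents};
-- keys looked up with lev[d] / rel[a] always exist (d, a ∈ agents), so getD's default is never used
def altRound (agents : List String) (rel : PySem.Dict String (List String)) (lv : PySem.Dict String Nat) : PySem.Dict String Nat :=
  agents.foldl (fun d a =>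
    d.insert a (if rel.getD a [] = [] then 0
                else (((rel.getD a []).map (fun x => lv.getD x 0)).max?.getD 0) + 1)) PySem.Dict.empty

-- B's 'for _ in range(n): new = …; if new == lev: break; lev = new' loop, as a countdown recursion;
-- both dicts are comprehensions over the same agents list, so they share one key sequence and
-- Dict equality ('=' on the items list) is exactly Python's dict ==
def altIter (agents : List String) (rel : PySem.Dict String (List String)) :
    Nat → PySem.Dict String Nat → PySem.Dict String Nat
  | 0, lv => lv
  | k+1, lv =>
    let nlv := altRound agents rel lv
    if nlv = lv then lv else altIter agents rel k nlv

def build_execution_order_subset_py_alt (agents : List String) (dependencies : List (String × List String)) : List String :=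
  let n := agents.length
  let in_subset : PySem.Set String := PySem.Set.ofList agents
  let rel : PySem.Dict String (List String) :=
    agents.foldl (fun d a => d.insert a (((PySem.Dict.mk dependencies).getD a []).filter
      (fun x => PySem.Set.contains in_subset x))) PySem.Dict.empty
  let lev0 : PySem.Dict String Nat := agents.foldl (fun d a => d.insert a 0) PySem.Dict.empty
  let lev := altIter agents rel n lev0
  PySem.List.sorted agents (fun a => lev.getD a 0) false

-- ===== PRECONDITION & SPEC =====
def Spec_build_execution_order_subset_py (agents : List String) (dependencies : List (String × List String)) (out : List String) : Prop := out = build_execution_order_subset_py_alt agents dependencies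
instance (agents : List String) (dependencies : List (String × List String)) (out : List String) : Decidable (Spec_build_execution_order_subset_py agents dependencies out) := by unfold Spec_build_execution_order_subset_py; infer_instance

-- ===== CLAIM =====
def Claim_equal_build_execution_order_subset_py : Prop := ∀ (agents : List String) (dependencies : List (String × List String)), Dom_build_execution_order_subset_py agents dependencies → Spec_build_execution_order_subset_py agents dependencies (build_execution_order_subset_py agents dependencies)

-- ===== LEMMAS AND PROOFS =====

-- max?.getD 0 of a nonempty Nat list is attained and bounds every member
theorem maxD_mem (l : List Nat) (h : l ≠ []) : l.max?.getD 0 ∈ l := by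
  cases hm : l.max? with
  | none => exact absurd (List.max?_eq_none_iff.mp hm) h
  | some a => simpa using List.max?_mem hm

theorem le_maxD (l : List Nat) (x : Nat) (h : x ∈ l) : x ≤ l.max?.getD 0 := by
  cases hm : l.max? with
  | none => simp [List.max?_eq_none_iff.mp hm] at h
  | some a => simpa using (List.max?_le_iff hm (x := a)).mp le_rfl x h

-- levels: levk r k a = length of the longest dependency walk from a, truncated at k
def levk (r : String → List String) : Nat → String → Nat
  | 0, _ => 0
  | k+1, a => if r a = [] then 0 else (((r a).map (fun d => levk r k d)).max?.getD 0) + 1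

theorem levk_zero (r : String → List String) (a : String) : levk r 0 a = 0 := rfl

theorem levk_succ (r : String → List String) (k : Nat) (a : String) :
    levk r (k+1) a = if r a = [] then 0
      else (((r a).map (fun d => levk r k d)).max?.getD 0) + 1 := rfl

theorem levk_le (r : String → List String) : ∀ (k : Nat) (a : String), levk r k a ≤ k := by
  intro k
  induction k with
  | zero => intro a; simp [levk_zero]
  | succ k ih =>
    intro a
    by_cases h : r a = []
    · simp [levk_succ, h]
    · rw [levk_succ, if_neg h]
      have hmem := maxD_mem ((r a).map (fun d => levk r k d)) (by simpa using h)
      obtain ⟨d, _, hd⟩ := List.mem_map.mp hmem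
      have := ih d
      omega

theorem levk_mono (r : String → List String) : ∀ (k : Nat) (a : String), levk r k a ≤ levk r (k+1) a := by
  intro k
  induction k with
  | zero => intro a; simp [levk_zero]
  | succ k ih =>
    intro a
    by_cases h : r a = []
    · simp [levk_succ, h]
    · rw [levk_succ, if_neg h, levk_succ, if_neg h]
      have hmem := maxD_mem ((r a).map (fun d => levk r k d)) (by simpa using h)
      obtain ⟨d, hdmem, hd⟩ := List.mem_map.mp hmem
      have h1 : levk r k d ≤ levk r (k+1) d := ih d
      have h2 : levk r (k+1) d ≤ ((r a).map (fun d => levk r (k+1) d)).max?.getD 0 :=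
        le_maxD _ _ (List.mem_map.mpr ⟨d, hdmem, rfl⟩)
      omega

theorem levk_incr (r : String → List String) : ∀ (k : Nat) (a : String), levk r (k+1) a ≤ levk r k a + 1 := by
  intro k
  induction k with
  | zero =>
    intro a
    have h1 := levk_le r (0+1) a
    have h0 : levk r 0 a = 0 := levk_zero r a
    omega
  | succ k ih =>
    intro a
    by_cases h : r a = []
    · simp [levk_succ, h]
    · rw [levk_succ, if_neg h, levk_succ, if_neg h]
      have hmem := maxD_mem ((r a).map (fun d => levk r (k+1) d)) (by simpa using h)
      obtain ⟨d, hdmem, hd⟩ := List.mem_map.mp hmem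
      have h1 : levk r (k+1) d ≤ levk r k d + 1 := ih d
      have h2 : levk r k d ≤ ((r a).map (fun d => levk r k d)).max?.getD 0 :=
        le_maxD _ _ (List.mem_map.mpr ⟨d, hdmem, rfl⟩)
      omega

-- a level that still grows at step k+1 has hit the truncation frontier k+1
theorem levk_frontier (r : String → List String) : ∀ (k : Nat) (a : String),
    levk r k a < levk r (k+1) a → levk r (k+1) a = k+1 := by
  intro k
  induction k with
  | zero =>
    intro a h
    have h1 := levk_le r (0+1) a
    have h0 : levk r 0 a = 0 := levk_zero r a
    omega
  | succ k ih =>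
    intro a h
    by_cases hra : r a = []
    · rw [levk_succ, if_pos hra] at h
      rw [levk_succ, if_pos hra] at h
      omega
    · rw [levk_succ, if_neg hra, levk_succ, if_neg hra] at h
      rw [levk_succ, if_neg hra]
      have hmem := maxD_mem ((r a).map (fun d => levk r (k+1) d)) (by simpa using hra)
      obtain ⟨d, hdmem, hd⟩ := List.mem_map.mp hmem
      have h2 : levk r k d ≤ ((r a).map (fun d => levk r k d)).max?.getD 0 :=
        le_maxD _ _ (List.mem_map.mpr ⟨d, hdmem, rfl⟩)
      have h3 : levk r k d < levk r (k+1) d := by omega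
      have h4 := ih d h3
      have h5 : levk r (k+1) d ≤ ((r a).map (fun d => levk r (k+1) d)).max?.getD 0 :=
        le_maxD _ _ (List.mem_map.mpr ⟨d, hdmem, rfl⟩)
      have h6 := levk_le r (k+1) a
      have h7 : ((r a).map (fun d => levk r (k+1) d)).max?.getD 0 ≤ k+1 := by
        have hmem' := maxD_mem ((r a).map (fun d => levk r (k+1) d)) (by simpa using hra)
        obtain ⟨e, _, he⟩ := List.mem_map.mp hmem'
        have := levk_le r (k+1) e
        omega
      omega

-- a level strictly below its truncation frontier has stabilised for good
theorem levk_stall (r : String → List String) (m : Nat) (a : String) (hm : levk r m a < m) :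
    ∀ (j : Nat), m ≤ j → levk r j a = levk r m a := by
  intro j
  induction j with
  | zero => intro h; interval_cases m; rfl
  | succ j ih =>
    intro h
    rcases Nat.lt_or_ge m (j+1) with h1 | h1
    · have hj : m ≤ j := by omega
      have he := ih hj
      rcases Nat.lt_or_ge (levk r j a) (levk r (j+1) a) with h2 | h2
      · have := levk_frontier r j a h2
        have := levk_incr r j a
        omega
      · have := levk_mono r j a
        omega
    · have : m = j + 1 := by omega
      subst this; rfl

-- if every dependency's final level is < j, a's final level is ≤ j
theorem levk_deps_le (r : String → List String) (n j : Nat) (a : String)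
    (h : ∀ d ∈ r a, levk r n d < j) : levk r n a ≤ j := by
  cases n with
  | zero => simp [levk_zero]
  | succ k =>
    by_cases hra : r a = []
    · simp [levk_succ, hra]
    · rw [levk_succ, if_neg hra]
      have hmem := maxD_mem ((r a).map (fun d => levk r k d)) (by simpa using hra)
      obtain ⟨d, hdmem, hd⟩ := List.mem_map.mp hmem
      have h1 := levk_mono r k d
      have h2 := h d hdmem
      omega

-- every dependency of an agent at finite final level j sits at a strictly smaller final level
theorem levk_deps_lt (r : String → List String) (n j : Nat) (a : String)
    (hkey : levk r n a = j) (hjn : j < n) : ∀ d ∈ r a, levk r n d < j := by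
  intro d hd
  cases n with
  | zero => omega
  | succ k =>
    by_cases hra : r a = []
    · rw [hra] at hd; cases hd
    · rw [levk_succ, if_neg hra] at hkey
      have h1 : levk r k d ≤ ((r a).map (fun d => levk r k d)).max?.getD 0 :=
        le_maxD _ _ (List.mem_map.mpr ⟨d, hd, rfl⟩)
      have h2 : levk r k d < k := by omega
      have h3 := levk_stall r k d h2 (k+1) (by omega)
      omega

-- an agent at finite positive final level has a dependency exactly one level below
theorem levk_pred (r : String → List String) (n : Nat) (a : String)
    (h0 : 0 < levk r n a) (hn : levk r n a < n) :
    ∃ d ∈ r a, levk r n d = levk r n a - 1 := by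
  cases n with
  | zero => omega
  | succ k =>
    by_cases hra : r a = []
    · rw [levk_succ, if_pos hra] at h0; omega
    · rw [levk_succ, if_neg hra] at h0 hn ⊢
      have hmem := maxD_mem ((r a).map (fun d => levk r k d)) (by simpa using hra)
      obtain ⟨d, hdmem, hd⟩ := List.mem_map.mp hmem
      refine ⟨d, hdmem, ?_⟩
      have h2 : levk r k d < k := by omega
      have h3 := levk_stall r k d h2 (k+1) (by omega)
      omega

-- the instantiation at A's relevant-dependency function
def relOf (agents : List String) (dependencies : List (String × List String)) (a : String) : List String :=
  ((PySem.Dict.mk dependencies).getD a []).filter (fun d => agents.contains d)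

def keyOf (agents : List String) (dependencies : List (String × List String)) (a : String) : Nat :=
  levk (relOf agents dependencies) agents.length a

def grp (agents : List String) (dependencies : List (String × List String)) (v : Nat) : List String :=
  agents.filter (fun a => keyOf agents dependencies a = v)

theorem relOf_mem_agents (agents : List String) (dependencies : List (String × List String))
    (a d : String) (hd : d ∈ relOf agents dependencies a) : d ∈ agents := by
  have := (List.mem_filter.mp hd).2
  simpa using this

-- finite levels are downward closed: a nonempty level v < n forces a nonempty level w for every w ≤ v
theorem grp_descend (agents : List String) (dependencies : List (String × List String)) :
    ∀ (c v w : Nat), v - w ≤ c → w ≤ v → v < agents.length →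
    (∃ a ∈ agents, keyOf agents dependencies a = v) → ∃ b ∈ agents, keyOf agents dependencies b = w := by
  intro c
  induction c with
  | zero =>
    intro v w hc hw _ h
    have : v = w := by omega
    subst this; exact h
  | succ c ih =>
    intro v w hc hw hv h
    rcases Nat.eq_or_lt_of_le hw with rfl | hlt
    · exact h
    · obtain ⟨a, ha, hk⟩ := h
      unfold keyOf at hk
      have h0 : 0 < levk (relOf agents dependencies) agents.length a := by omega
      obtain ⟨d, hd, hkd⟩ := levk_pred (relOf agents dependencies) agents.length a h0 (by omega)
      refine ih (v-1) w (by omega) (by omega) (by omega) ?_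
      exact ⟨d, relOf_mem_agents agents dependencies a d hd, by unfold keyOf; omega⟩

-- ready agents of a round are exactly the agents of the current level
theorem ready_eq_grp (agents : List String) (dependencies : List (String × List String))
    (j : Nat) (executed : PySem.Set String) (hj : j < agents.length)
    (hinv : ∀ x, PySem.Set.contains executed x
      = (agents.contains x && decide (keyOf agents dependencies x < j))) :
    pyReadyAgents agents dependencies executed = grp agents dependencies j := by
  rw [pyReadyAgents_eq_filter]
  unfold grp
  apply List.filter_congr
  intro a ha
  have hca : agents.contains a = true := by simpa using ha
  apply Bool.eq_iff_iff.mpr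
  simp only [Bool.and_eq_true, Bool.not_eq_true', List.all_eq_true, decide_eq_true_eq, hinv, hca,
    Bool.true_and]
  constructor
  · rintro ⟨hna, hall⟩
    have hdeps : ∀ d ∈ relOf agents dependencies a, keyOf agents dependencies d < j := by
      intro d hd
      have := hall d hd
      simp only [Bool.and_eq_true, decide_eq_true_eq] at this
      exact this.2
    have hle : keyOf agents dependencies a ≤ j := levk_deps_le _ _ _ _ hdeps
    have hge : ¬ (keyOf agents dependencies a < j) := by simpa using hna
    omega
  · intro hk
    constructor
    · simp [hk]
    · intro d hd
      have h1 : agents.contains d = true := by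
        simpa using relOf_mem_agents agents dependencies a d hd
      have h2 := levk_deps_lt (relOf agents dependencies) agents.length j a hk hj d hd
      refine ⟨by simpa using h1, ?_⟩
      unfold keyOf
      exact h2

-- if the counting guard fails, every agent has been executed
theorem guard_false_all_executed (agents : List String) (executed : PySem.Set String)
    (hnd : executed.Nodup) (hsub : ∀ x ∈ executed, x ∈ agents)
    (hge : ¬ (PySem.Set.len executed < (agents.length : Int))) :
    agents.filter (fun a => !(PySem.Set.contains executed a)) = [] := by
  by_contra hne
  obtain ⟨a, ha⟩ := List.exists_mem_of_ne_nil _ hne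
  have hmem := List.mem_filter.mp ha
  have hae : a ∉ executed := by
    intro hcon
    have := (PySem.Set.contains_iff executed a).mpr hcon
    simp at hmem
    exact hmem.2 hcon
  have hnd' : (a :: executed).Nodup := List.nodup_cons.mpr ⟨hae, hnd⟩
  have hsub' : (a :: executed) ⊆ agents := List.cons_subset.mpr ⟨hmem.1, fun x hx => hsub x hx⟩
  have hle := (List.subperm_of_subset hnd' hsub').length_le
  rw [PySem.Set.len_eq] at hge
  simp at hle
  omega

-- when every agent is already executed, A's loop stops
theorem pyOrderLoop_done (agents : List String) (dependencies : List (String × List String))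
    (executed : PySem.Set String) (order : List String)
    (hnone : agents.filter (fun a => !(PySem.Set.contains executed a)) = []) :
    pyOrderLoop agents dependencies executed order = order := by
  rw [pyOrderLoop]
  split
  · have hready : pyReadyAgents agents dependencies executed = [] := by
      rw [pyReadyAgents_eq_filter]
      apply List.filter_eq_nil_iff.mpr
      intro a ha hcond
      have h1 := List.filter_eq_nil_iff.mp hnone a ha
      simp only [Bool.and_eq_true] at hcond
      exact h1 hcond.1
    simp only [hready]
    simp only [reduceDIte]
    rw [hnone]
    simp
  · rfl

-- stable sort by a bounded Nat key lists the key-groups in increasing key order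
theorem insertBy_cons {α : Type} (p : α → α → Bool) (x y : α) (ys : List α) :
    PySem.List.insertBy p x (y :: ys)
      = if p x y then x :: y :: ys else y :: PySem.List.insertBy p x ys := rfl

theorem insertBy_skip {α : Type} (p : α → α → Bool) (x : α) (F R : List α)
    (h : ∀ y ∈ F, p x y = false) :
    PySem.List.insertBy p x (F ++ R) = F ++ PySem.List.insertBy p x R := by
  induction F with
  | nil => simp
  | cons y t ih =>
    have hy := h y (by simp)
    simp only [List.cons_append, insertBy_cons, hy, if_neg Bool.false_ne_true]
    rw [ih (fun z hz => h z (by simp [hz]))]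

theorem insertBy_front {α : Type} (p : α → α → Bool) (x : α) (R : List α)
    (h : ∀ y ∈ R, p x y = true) :
    PySem.List.insertBy p x R = x :: R := by
  cases R with
  | nil => rfl
  | cons y t => simp [insertBy_cons, h y (by simp)]

theorem sorted_eq_flat_groups (key : String → Nat) :
    ∀ (xs : List String) (B : Nat), (∀ a ∈ xs, key a < B) →
    PySem.List.sorted xs key false
      = (List.range B).flatMap (fun v => xs.filter (fun a => key a = v)) := by
  intro xs
  induction xs using List.reverseRecOn with
  | nil => intro B _; simp [PySem.List.sorted_eq_foldl_insertBy]
  | append_singleton xs x ih =>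
    intro B hB
    have hxB : key x < B := hB x (by simp)
    have hxs : ∀ a ∈ xs, key a < B := fun a ha => hB a (by simp [ha])
    rw [PySem.List.sorted_eq_foldl_insertBy, List.foldl_append]
    rw [← PySem.List.sorted_eq_foldl_insertBy, ih B hxs]
    simp only [List.foldl_cons, List.foldl_nil]
    have hBsplit : B = (key x + 1) + (B - (key x + 1)) := by omega
    have hrange : List.range B
        = List.range (key x + 1) ++ (List.range (B - (key x + 1))).map (fun i => (key x + 1) + i) := by
      conv_lhs => rw [hBsplit]
      rw [List.range_add]
    -- left part: the groups with key ≤ key x; right part: the groups with key > key x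
    rw [hrange]
    simp only [List.flatMap_append, List.flatMap_map]
    set F := (List.range (key x + 1)).flatMap (fun v => xs.filter (fun a => key a = v)) with hF
    set R := (List.range (B - (key x + 1))).flatMap
        (fun i => xs.filter (fun a => key a = (key x + 1) + i)) with hR
    have hFmem : ∀ y ∈ F, key y ≤ key x := by
      intro y hy
      obtain ⟨v, hv, hyv⟩ := List.mem_flatMap.mp hy
      have := (List.mem_filter.mp hyv).2
      have hvlt := List.mem_range.mp hv
      simp at this
      omega
    have hRmem : ∀ y ∈ R, key x < key y := by
      intro y hy
      obtain ⟨i, _, hyv⟩ := List.mem_flatMap.mp hy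
      have := (List.mem_filter.mp hyv).2
      simp at this
      omega
    rw [insertBy_skip _ _ _ _ (fun y hy => by simp [Nat.not_lt.mpr (hFmem y hy)])]
    rw [insertBy_front _ _ _ (fun y hy => by simp [hRmem y hy])]
    -- now match against the groups of xs ++ [x]
    have hfR : (List.range (B - (key x + 1))).flatMap
          (fun i => (xs ++ [x]).filter (fun a => key a = (key x + 1) + i)) = R := by
      rw [hR]
      apply List.flatMap_congr
      intro i _
      rw [List.filter_append]
      have : ([x].filter (fun a => key a = (key x + 1) + i)) = [] := by
        simp; omega
      simp [this]
    have hfF : (List.range (key x + 1)).flatMap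
          (fun v => (xs ++ [x]).filter (fun a => key a = v)) = F ++ [x] := by
      rw [hF, List.range_succ, List.flatMap_append, List.flatMap_append]
      have h1 : (List.range (key x)).flatMap (fun v => (xs ++ [x]).filter (fun a => key a = v))
          = (List.range (key x)).flatMap (fun v => xs.filter (fun a => key a = v)) := by
        apply List.flatMap_congr
        intro v hv
        have hvlt := List.mem_range.mp hv
        rw [List.filter_append]
        have : ([x].filter (fun a => key a = v)) = [] := by simp; omega
        simp [this]
      rw [h1]
      simp [List.filter_append]
    rw [hfR, hfF]
    simp

-- total size: the groups 0..n partition the agents list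
theorem flat_groups_length (agents : List String) (dependencies : List (String × List String)) :
    ((List.range (agents.length + 1)).flatMap (grp agents dependencies)).length = agents.length := by
  have h := sorted_eq_flat_groups (keyOf agents dependencies) agents (agents.length + 1)
    (fun a _ => by have := levk_le (relOf agents dependencies) agents.length a; unfold keyOf; omega)
  calc ((List.range (agents.length + 1)).flatMap (grp agents dependencies)).length
      = (PySem.List.sorted agents (keyOf agents dependencies) false).length := by rw [h]; rfl
    _ = agents.length := PySem.List.length_sorted _ _ _

theorem one_le_sum (l : List Nat) (h : ∀ x ∈ l, 1 ≤ x) : l.length ≤ l.sum := by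
  induction l with
  | nil => simp
  | cons x t ih =>
    simp only [List.length_cons, List.sum_cons]
    have := h x (by simp)
    have := ih (fun y hy => h y (by simp [hy]))
    omega

-- A's loop, started at level j with the levels below j already executed, emits the groups j..n
theorem loopA (agents : List String) (dependencies : List (String × List String)) :
    ∀ (m j : Nat) (executed : PySem.Set String) (order : List String),
    agents.length + 1 = j + m →
    executed.Nodup → (∀ x ∈ executed, x ∈ agents) →
    (∀ x, PySem.Set.contains executed x
       = (agents.contains x && decide (keyOf agents dependencies x < j))) →
    (∀ v, v < j → grp agents dependencies v ≠ []) →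
    pyOrderLoop agents dependencies executed order
      = order ++ (List.range' j (agents.length + 1 - j)).flatMap (grp agents dependencies) := by
  intro m
  induction m with
  | zero =>
    intro j executed order harith _ _ _ hH
    exfalso
    have hlen := flat_groups_length agents dependencies
    rw [List.length_flatMap] at hlen
    have hone : ∀ x ∈ (List.range (agents.length + 1)).map
        (fun v => (grp agents dependencies v).length), 1 ≤ x := by
      intro x hx
      obtain ⟨v, hv, rfl⟩ := List.mem_map.mp hx
      have := hH v (by have := List.mem_range.mp hv; omega)
      have := List.length_pos_of_ne_nil this
      omega
    have := one_le_sum _ hone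
    simp at this
    omega
  | succ m ih =>
    intro j executed order harith hnd hsub hinv hH
    set n := agents.length with hn
    rcases Nat.lt_or_ge j n with hjn | hjn
    · -- j < n : a genuine round
      have hready := ready_eq_grp agents dependencies j executed hjn hinv
      by_cases hg : grp agents dependencies j = []
      · -- level j is empty: every remaining agent is cycle-blocked (level n); A breaks
        have hmid : ∀ v, j ≤ v → v < n → grp agents dependencies v = [] := by
          intro v h1 h2
          by_contra hne
          obtain ⟨a, ha⟩ := List.exists_mem_of_ne_nil _ hne
          have hmem := List.mem_filter.mp ha
          have hkv : keyOf agents dependencies a = v := by simpa using hmem.2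
          have := grp_descend agents dependencies (v - j) v j (by omega) h1 h2
            ⟨a, hmem.1, hkv⟩
          obtain ⟨b, hb, hkb⟩ := this
          exact (List.ne_nil_of_mem (a := b)
            (List.mem_filter.mpr ⟨hb, by simpa using hkb⟩)) hg
        have hunex : agents.filter (fun a => !(PySem.Set.contains executed a))
            = grp agents dependencies n := by
          unfold grp
          apply List.filter_congr
          intro a ha
          have hca : agents.contains a = true := by simpa using ha
          rw [hinv a, hca]
          apply Bool.eq_iff_iff.mpr
          simp only [Bool.true_and, Bool.not_eq_true', decide_eq_false_iff_not, Nat.not_lt,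
            decide_eq_true_eq]
          constructor
          · intro hge
            have hle : keyOf agents dependencies a ≤ n := by
              have := levk_le (relOf agents dependencies) agents.length a
              unfold keyOf; omega
            rcases Nat.eq_or_lt_of_le hle with h | h
            · exact h
            · exfalso
              have := hmid (keyOf agents dependencies a) hge h
              exact (List.ne_nil_of_mem
                (List.mem_filter.mpr ⟨ha, by simp⟩)) this
          · intro h; omega
        have hrhs : (List.range' j (n + 1 - j)).flatMap (grp agents dependencies)
            = grp agents dependencies n := by
          have hsplit : List.range' j (n + 1 - j) = List.range' j (n - j) ++ [n] := by
            have h1 : n + 1 - j = (n - j) + 1 := by omega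
            rw [h1, List.range'_1_concat]
            congr 2
            omega
          rw [hsplit, List.flatMap_append]
          have hz : (List.range' j (n - j)).flatMap (grp agents dependencies) = [] := by
            apply List.flatMap_eq_nil_iff.mpr
            intro v hv
            have := List.mem_range'_1.mp hv
            exact hmid v this.1 (by omega)
          simp [hz]
        rw [pyOrderLoop]
        split
        · simp only [hready, hg, reduceDIte]
          rw [hunex, hrhs]
        · rename_i hguard
          have hall := guard_false_all_executed agents executed hnd hsub hguard
          rw [hunex] at hall
          rw [hrhs, hall]
          simp
      · -- level j is nonempty: A executes exactly the agents of level j and recurses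
        obtain ⟨a, ha⟩ := List.exists_mem_of_ne_nil _ hg
        have hamem := List.mem_filter.mp ha
        have hguard : PySem.Set.len executed < (agents.length : Int) := by
          by_contra hge
          have hall := guard_false_all_executed agents executed hnd hsub hge
          have : a ∈ agents.filter (fun a => !(PySem.Set.contains executed a)) := by
            apply List.mem_filter.mpr
            refine ⟨hamem.1, ?_⟩
            rw [hinv a]
            simp only [Bool.not_eq_true']
            have hka : keyOf agents dependencies a = j := by simpa using hamem.2
            simp [hka]
          rw [hall] at this
          cases this
        rw [pyOrderLoop]
        rw [dif_pos hguard]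
        simp only [hready]
        rw [dif_neg hg]
        have hrec := ih (j+1) (PySem.Set.update executed (grp agents dependencies j))
          (order ++ grp agents dependencies j) (by omega)
          (PySem.Set.nodup_update _ _ hnd)
          (by
            intro x hx
            rcases (PySem.Set.mem_update _ _ _).mp hx with h | h
            · exact hsub x h
            · exact (List.mem_filter.mp h).1)
          (by
            intro x
            apply Bool.eq_iff_iff.mpr
            rw [PySem.Set.contains_iff, PySem.Set.mem_update]
            constructor
            · rintro (h | h)
              · have := (PySem.Set.contains_iff executed x).mpr h
                rw [hinv x] at this
                simp only [Bool.and_eq_true, decide_eq_true_eq] at this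
                simp only [Bool.and_eq_true, decide_eq_true_eq]
                exact ⟨this.1, by omega⟩
              · have hmem := List.mem_filter.mp h
                simp only [Bool.and_eq_true, decide_eq_true_eq]
                refine ⟨by simpa using hmem.1, ?_⟩
                have : keyOf agents dependencies x = j := by simpa using hmem.2
                omega
            · intro h
              simp only [Bool.and_eq_true, decide_eq_true_eq] at h
              rcases Nat.lt_or_ge (keyOf agents dependencies x) j with hlt | hge2
              · left
                apply (PySem.Set.contains_iff executed x).mp
                rw [hinv x, h.1]
                simp [hlt]
              · right
                apply List.mem_filter.mpr
                refine ⟨by simpa using h.1, ?_⟩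
                have : keyOf agents dependencies x = j := by omega
                simp [this])
          (by
            intro v hv
            rcases Nat.lt_or_ge v j with h | h
            · exact hH v h
            · have : v = j := by omega
              subst this; exact hg)
        rw [hrec]
        have hsplit : List.range' j (n + 1 - j) = j :: List.range' (j+1) (n - j) := by
          have h1 : n + 1 - j = (n - j) + 1 := by omega
          rw [h1, List.range'_succ]
        rw [hsplit]
        simp
    · -- j = n : the only possibly-remaining group n must be empty (counting), loop stops
      have hjeq : j = n := by omega
      subst hjeq
      have hlen := flat_groups_length agents dependencies
      rw [List.length_flatMap] at hlen
      have hgn : grp agents dependencies n = [] := by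
        have hsplitr : List.range (n + 1) = List.range n ++ [n] := List.range_succ
        rw [hsplitr] at hlen
        simp only [List.map_append, List.sum_append, List.map_cons, List.map_nil,
          List.sum_cons, List.sum_nil] at hlen
        have hone : ∀ x ∈ (List.range n).map (fun v => (grp agents dependencies v).length), 1 ≤ x := by
          intro x hx
          obtain ⟨v, hv, rfl⟩ := List.mem_map.mp hx
          have := hH v (List.mem_range.mp hv)
          have := List.length_pos_of_ne_nil this
          omega
        have := one_le_sum _ hone
        simp at this
        have : (grp agents dependencies n).length = 0 := by omega
        exact List.eq_nil_of_length_eq_zero this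
      have hunex : agents.filter (fun a => !(PySem.Set.contains executed a)) = [] := by
        apply List.filter_eq_nil_iff.mpr
        intro a ha hcond
        rw [hinv a] at hcond
        have hca : agents.contains a = true := by simpa using ha
        simp only [hca, Bool.true_and, Bool.not_eq_true', decide_eq_false_iff_not,
          Nat.not_lt] at hcond
        have hle : keyOf agents dependencies a ≤ n := by
          have := levk_le (relOf agents dependencies) agents.length a
          unfold keyOf; omega
        have hka : keyOf agents dependencies a = n := by omega
        exact (List.ne_nil_of_mem (List.mem_filter.mpr ⟨ha, by simp [hka]⟩)) hgn
      rw [pyOrderLoop_done agents dependencies executed order hunex]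
      have : n + 1 - n = 1 := by omega
      rw [this]
      simp [List.range'_one, hgn]

-- ===== bridging B's dictionaries to the level function =====

theorem contains_ofList_eq (l : List String) (x : String) :
    PySem.Set.contains (PySem.Set.ofList l) x = l.contains x := by
  apply Bool.eq_iff_iff.mpr
  rw [PySem.Set.contains_iff, PySem.Set.mem_ofList]
  simp

theorem getD_foldl_insert_fun {ν : Type} (f : String → ν) (d0 : ν) :
    ∀ (l : List String) (d : PySem.Dict String ν) (x : String),
    (l.foldl (fun d a => d.insert a (f a)) d).getD x d0 = if x ∈ l then f x else d.getD x d0 := by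
  intro l
  induction l with
  | nil => simp
  | cons a t ih =>
    intro d x
    simp only [List.foldl_cons]
    rw [ih]
    rw [PySem.Dict.getD_insert]
    by_cases hxt : x ∈ t <;> by_cases hxa : x = a <;> simp [hxt, hxa]

theorem relDict_getD (agents : List String) (dependencies : List (String × List String))
    (a : String) (ha : a ∈ agents) :
    (agents.foldl (fun d a => d.insert a (((PySem.Dict.mk dependencies).getD a []).filter
        (fun x => PySem.Set.contains (PySem.Set.ofList agents) x))) PySem.Dict.empty).getD a []
      = relOf agents dependencies a := by
  rw [getD_foldl_insert_fun]
  rw [if_pos ha]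
  unfold relOf
  apply List.filter_congr
  intro d _
  rw [contains_ofList_eq]

theorem altRound_getD (agents : List String) (dependencies : List (String × List String))
    (j : Nat) (lv : PySem.Dict String Nat)
    (hlv : ∀ d ∈ agents, lv.getD d 0 = levk (relOf agents dependencies) j d) :
    ∀ x ∈ agents,
    (altRound agents
        (agents.foldl (fun d a => d.insert a (((PySem.Dict.mk dependencies).getD a []).filter
          (fun x => PySem.Set.contains (PySem.Set.ofList agents) x))) PySem.Dict.empty) lv).getD x 0
      = levk (relOf agents dependencies) (j+1) x := by
  intro x hx
  unfold altRound
  rw [getD_foldl_insert_fun, if_pos hx]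
  rw [relDict_getD agents dependencies x hx]
  by_cases hra : relOf agents dependencies x = []
  · simp [levk_succ, hra]
  · rw [if_neg hra]
    rw [levk_succ, if_neg hra]
    congr 2
    exact congrArg List.max? (List.map_congr_left
      (fun d hd => hlv d (relOf_mem_agents agents dependencies x d hd)))

-- a level assignment that is a fixpoint across the agents stays fixed for all later rounds
theorem levk_fix_agents (agents : List String) (dependencies : List (String × List String))
    (j : Nat)
    (h : ∀ x ∈ agents, levk (relOf agents dependencies) (j+1) x = levk (relOf agents dependencies) j x) :
    ∀ (i : Nat), j ≤ i → ∀ x ∈ agents,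
      levk (relOf agents dependencies) i x = levk (relOf agents dependencies) j x := by
  intro i
  induction i with
  | zero =>
    intro hji x hx
    have : j = 0 := by omega
    subst this; rfl
  | succ i ih =>
    intro hji x hx
    rcases Nat.lt_or_ge j (i+1) with h1 | h1
    · have hji' : j ≤ i := by omega
      have hstep : levk (relOf agents dependencies) (i+1) x = levk (relOf agents dependencies) (j+1) x := by
        rw [levk_succ, levk_succ]
        by_cases hra : relOf agents dependencies x = []
        · rw [if_pos hra, if_pos hra]
        · rw [if_neg hra, if_neg hra]
          congr 2
          exact congrArg List.max? (List.map_congr_left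
            (fun d hd => ih hji' d (relOf_mem_agents agents dependencies x d hd)))
      rw [hstep, h x hx]
    · have : j = i + 1 := by omega
      subst this; rfl

theorem altIter_getD (agents : List String) (dependencies : List (String × List String)) :
    ∀ (m j : Nat) (lv : PySem.Dict String Nat),
    (∀ d ∈ agents, lv.getD d 0 = levk (relOf agents dependencies) j d) →
    ∀ x ∈ agents,
    (altIter agents
        (agents.foldl (fun d a => d.insert a (((PySem.Dict.mk dependencies).getD a []).filter
          (fun x => PySem.Set.contains (PySem.Set.ofList agents) x))) PySem.Dict.empty) m lv).getD x 0
      = levk (relOf agents dependencies) (j + m) x := by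
  intro m
  induction m with
  | zero => intro j lv hlv x hx; exact hlv x hx
  | succ m ih =>
    intro j lv hlv x hx
    rw [altIter]
    split
    · rename_i heq
      -- the new round changed nothing: the levels have reached their fixpoint
      have hfix : ∀ y ∈ agents,
          levk (relOf agents dependencies) (j+1) y = levk (relOf agents dependencies) j y := by
        intro y hy
        have h1 := altRound_getD agents dependencies j lv hlv y hy
        rw [heq] at h1
        rw [← h1, hlv y hy]
      have := levk_fix_agents agents dependencies j hfix (j + (m+1)) (by omega) x hx
      rw [this, hlv x hx]
    · have hnext := altRound_getD agents dependencies j lv hlv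
      have := ih (j+1) _ hnext x hx
      rw [this]
      congr 1
      omega

-- a stable sort only looks at the keys of the list's members
theorem sorted_key_congr (xs : List String) (k1 k2 : String → Nat)
    (h : ∀ a ∈ xs, k1 a = k2 a) :
    PySem.List.sorted xs k1 false = PySem.List.sorted xs k2 false := by
  rw [PySem.List.sorted_eq_foldl_insertBy, PySem.List.sorted_eq_foldl_insertBy]
  have main : ∀ (l acc : List String), (∀ x ∈ l, x ∈ xs) → (∀ x ∈ acc, x ∈ xs) →
      l.foldl (fun acc x => PySem.List.insertBy (fun a b => decide (k1 a < k1 b)) x acc) acc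
        = l.foldl (fun acc x => PySem.List.insertBy (fun a b => decide (k2 a < k2 b)) x acc) acc := by
    intro l
    induction l with
    | nil => intro acc _ _; rfl
    | cons x t iht =>
      intro acc hl hacc
      simp only [List.foldl_cons]
      have hins : PySem.List.insertBy (fun a b => decide (k1 a < k1 b)) x acc
          = PySem.List.insertBy (fun a b => decide (k2 a < k2 b)) x acc := by
        clear iht
        induction acc with
        | nil => rfl
        | cons y ys ihy =>
          rw [insertBy_cons, insertBy_cons]
          rw [h x (hl x (by simp)), h y (hacc y (by simp))]
          rw [ihy (fun z hz => hacc z (by simp [hz]))]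
      rw [hins]
      apply iht
      · intro z hz; exact hl z (by simp [hz])
      · intro z hz
        have := (PySem.List.mem_insertBy _ _ _ _).mp hz
        rcases this with rfl | hzin
        · exact hl z (by simp)
        · exact hacc z hzin
  exact main xs [] (fun x hx => hx) (fun x hx => by cases hx)

theorem alt_eq_sorted_key (agents : List String) (dependencies : List (String × List String)) :
    build_execution_order_subset_py_alt agents dependencies
      = PySem.List.sorted agents (keyOf agents dependencies) false := by
  unfold build_execution_order_subset_py_alt
  simp only
  apply sorted_key_congr
  intro a ha
  have hbase : ∀ d ∈ agents,
      (agents.foldl (fun d a => d.insert a 0) PySem.Dict.empty).getD d 0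
        = levk (relOf agents dependencies) 0 d := by
    intro d hd
    rw [getD_foldl_insert_fun, if_pos hd]
    rfl
  have := altIter_getD agents dependencies agents.length 0
    (agents.foldl (fun d a => d.insert a 0) PySem.Dict.empty) hbase a ha
  rw [this]
  unfold keyOf
  congr 1
  omega

-- ===== the two ports agree =====

theorem ports_agree (agents : List String) (dependencies : List (String × List String)) :
    build_execution_order_subset_py agents dependencies
      = build_execution_order_subset_py_alt agents dependencies := by
  have hA : build_execution_order_subset_py agents dependencies
      = (List.range' 0 (agents.length + 1)).flatMap (grp agents dependencies) := by
    unfold build_execution_order_subset_py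
    have := loopA agents dependencies (agents.length + 1) 0 PySem.Set.empty []
      (by omega)
      (by simp [PySem.Set.empty])
      (by intro x hx; simp [PySem.Set.empty] at hx)
      (by intro x; simp [PySem.Set.empty, PySem.Set.contains])
      (by intro v hv; omega)
    simpa using this
  have hB : build_execution_order_subset_py_alt agents dependencies
      = (List.range (agents.length + 1)).flatMap (grp agents dependencies) := by
    rw [alt_eq_sorted_key]
    exact sorted_eq_flat_groups (keyOf agents dependencies) agents (agents.length + 1)
      (fun a _ => by have := levk_le (relOf agents dependencies) agents.length a; unfold keyOf; omega)
  rw [hA, hB, List.range_eq_range']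

-- ===== VERDICT =====
theorem build_execution_order_subset_py_spec : Claim_equal_build_execution_order_subset_py := by
  intro agents dependencies _
  exact ports_agree agents dependencies
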